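-- pv_equiv track=rewrite | github.com/Anton-Naumov/Programming-101-with-Python | week03/business_card/old/BusinessCard.py | create_interests_tag
-- ===== SOURCE A (Python) =====
-- def validate_generate_tag_arguments(_type, name, content):
--     if type(_type) is not str or type(name) is not str:
--         raise TypeError('The tag type and name must be strings!')
--     if type(content) is not list:
--         raise TypeError('The content argument must be a list!')
--     for data in content:
--         if type(data) is not str:
--             raise TypeError("All of the contents must be strings!")
--
-- def generate_tag(_type, name, content):
--     validate_generate_tag_arguments(_type, name, content)
--     if name != '':
--         result_string = f'<{_type} class="{name}">'
--     else:
--         result_string = f'<{_type}>'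
--     for data in content:
--         data_lines = data.split('\n')
--         for line in data_lines:
--             result_string = f'{result_string}\n  {line}'
--     result_string = f'{result_string}\n</{_type}>'
--     return result_string
--
-- def generate_one_word_tag(_type, name, word):
--     if (type(_type) is not str or type(name) is not str or
--        type(word) is not str):
--         raise TypeError("The _type and word must be strings!")
--     if name == '':
--         return f'<{_type}>{word}</{_type}>'
--     else:
--         return f'<{_type} class="{name}">{word}</{_type}>'
--
-- def validate_interests(interests):
--     if type(interests) is not list:
--         raise TypeError("The interests must be a list with strings!")
--     for interest in interests:
--         if type(interest) is not str:
--             raise TypeError("All interests must be string!")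
--
-- def create_interests_tag(interests):
--     validate_interests(interests)
--     interest_header = generate_one_word_tag('h2', '', 'Interests:')
--     interests_list = []
--     for interest in interests:
--         interests_list.append(generate_one_word_tag('li', '', interest))
--     return generate_tag('div', 'interests', [interest_header,
--                         generate_tag('ul', '', interests_list)])
-- ===== SOURCE B (Python) =====
-- def create_interests_tag(interests):
--     if type(interests) is not list:
--         raise TypeError("The interests must be a list with strings!")
--     for interest in interests:
--         if type(interest) is not str:
--             raise TypeError("All interests must be string!")
--     lines = ['<div class="interests">', '  <h2>Interests:</h2>', '  <ul>']
--     for interest in interests: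
--         for line in ('<li>' + interest + '</li>').split('\n'):
--             lines.append('    ' + line)
--     lines.append('  </ul>')
--     lines.append('</div>')
--     return '\n'.join(lines)
-- ===== Notes on version B (the rewrite author's own statement) =====
-- stated objective: simpler
-- what changed: B validates the argument, then builds the output as one flat list of lines (splitting each '<li>...</li>' on newlines and indenting by four spaces) joined once with ' ', instead of A's nested helper calls that repeatedly concatenate, re-split and re-indent intermediate strings.
import Mathlib
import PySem

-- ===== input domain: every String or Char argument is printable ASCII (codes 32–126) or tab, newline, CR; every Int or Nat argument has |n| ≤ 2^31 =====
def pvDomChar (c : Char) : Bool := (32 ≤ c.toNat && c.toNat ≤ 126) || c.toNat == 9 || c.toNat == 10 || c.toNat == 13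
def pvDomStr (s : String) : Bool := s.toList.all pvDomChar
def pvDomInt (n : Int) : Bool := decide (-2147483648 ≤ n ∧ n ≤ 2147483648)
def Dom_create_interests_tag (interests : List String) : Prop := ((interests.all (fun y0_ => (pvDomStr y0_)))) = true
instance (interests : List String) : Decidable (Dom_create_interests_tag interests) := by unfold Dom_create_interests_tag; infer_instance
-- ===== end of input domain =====

-- B builds the answer as one flat list of output lines joined by '\n' (simpler decomposition);
-- A builds it by nested helper calls that concatenate and re-split strings.  Same return value everywhere.

-- exact port of s.split('\n') (nonempty literal separator, so Python's split never raises)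
def pySplitNL (s : String) : List String :=
  (PySem.Chars.splitOn s.toList ['\n']).map String.ofList

-- ===== PORT A =====
-- validate_interests / validate_generate_tag_arguments only check runtime types; under the type
-- convention every element is a string, so they always pass and are no-ops here (A is total).
def generate_one_word_tag (_type name word : String) : String :=
  if name = "" then "<" ++ _type ++ ">" ++ word ++ "</" ++ _type ++ ">"
  else "<" ++ _type ++ " class=\"" ++ name ++ "\">" ++ word ++ "</" ++ _type ++ ">"

def generate_tag (_type name : String) (content : List String) : String :=
  let result0 := if name ≠ "" then "<" ++ _type ++ " class=\"" ++ name ++ "\">" else "<" ++ _type ++ ">"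
  let result1 := content.foldl
    (fun r data => (pySplitNL data).foldl (fun r line => r ++ "\n  " ++ line) r) result0
  result1 ++ "\n</" ++ _type ++ ">"

def create_interests_tag (interests : List String) : String :=
  let interest_header := generate_one_word_tag "h2" "" "Interests:"
  let interests_list := interests.foldl
    (fun acc interest => acc ++ [generate_one_word_tag "li" "" interest]) ([] : List String)
  generate_tag "div" "interests" [interest_header, generate_tag "ul" "" interests_list]

-- ===== PORT B =====
def create_interests_tag_alt (interests : List String) : String :=
  let lines : List String := ["<div class=\"interests\">", "  <h2>Interests:</h2>", "  <ul>"]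
  let lines := interests.foldl
    (fun ls interest =>
      (pySplitNL ("<li>" ++ interest ++ "</li>")).foldl (fun ls line => ls ++ ["    " ++ line]) ls)
    lines
  let lines := (lines ++ ["  </ul>"]) ++ ["</div>"]
  PySem.Str.join "\n" lines

-- ===== PRECONDITION & SPEC =====
def Spec_create_interests_tag (interests : List String) (out : String) : Prop := out = create_interests_tag_alt interests
instance (interests : List String) (out : String) : Decidable (Spec_create_interests_tag interests out) := by unfold Spec_create_interests_tag; infer_instance

-- ===== CLAIM (what is proved, stated in full; the proofs are below) =====
def Claim_equal_create_interests_tag : Prop := ∀ (interests : List String), Dom_create_interests_tag interests → Spec_create_interests_tag interests (create_interests_tag interests)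

-- ===== LEMMAS AND PROOFS =====

theorem pv_go_eq (c : Char) : ∀ (fuel : Nat) (l cur : List Char) (acc : List (List Char)), l.length < fuel →
    PySem.Chars.splitOn.go [c] fuel l cur acc
      = acc.reverse ++ List.modifyHead (fun x => cur.reverse ++ x) (List.splitOnP (· == c) l) := by
  intro fuel
  induction fuel with
  | zero => intro l cur acc h; omega
  | succ f ih =>
    intro l cur acc h
    cases l with
    | nil =>
      rw [PySem.Chars.splitOn.go]
      simp only [List.splitOnP_nil, List.modifyHead, List.reverse_cons]
      simp
      omega
    | cons x rest =>
      rw [PySem.Chars.splitOn.go]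
      have hlen : rest.length < f := by simpa using Nat.lt_of_succ_lt_succ h
      by_cases hx : c = x
      · subst hx
        have hpre : List.isPrefixOf [c] (c :: rest) = true := by simp [List.isPrefixOf]
        simp only [hpre, if_true, List.length_cons, List.drop_succ_cons, List.length_nil,
          List.drop_zero]
        rw [ih rest [] (cur.reverse :: acc) hlen]
        rw [List.splitOnP_cons, if_pos (by simp)]
        cases hs : List.splitOnP (· == c) rest <;>
          simp [List.modifyHead, List.reverse_cons, List.append_assoc]
      · have hpre : List.isPrefixOf [c] (x :: rest) = false := by
          simp only [List.isPrefixOf, Bool.and_true]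
          simpa using hx
        simp only [hpre, Bool.false_eq_true, if_false]
        rw [ih rest (x :: cur) acc hlen]
        rw [List.splitOnP_cons, if_neg (by simp only [beq_iff_eq]; exact fun e => hx e.symm)]
        cases hs : List.splitOnP (· == c) rest <;>
          simp [List.modifyHead, List.reverse_cons, List.append_assoc]

theorem pv_splitOn_single (c : Char) (s : List Char) :
    PySem.Chars.splitOn s [c] = List.splitOn c s := by
  unfold PySem.Chars.splitOn
  rw [pv_go_eq c (s.length + 1) s [] [] (by omega)]
  cases hs : List.splitOnP (· == c) s <;> simp [List.splitOn, List.modifyHead, hs]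

theorem pv_not_mem_splitOn (c : Char) (s : List Char) : ∀ l ∈ List.splitOn c s, c ∉ l := by
  induction s with
  | nil => intro l hl; simp [List.splitOn, List.splitOnP_nil] at hl; simp [hl]
  | cons x t ih =>
    intro l hl
    rw [List.splitOn, List.splitOnP_cons] at hl
    by_cases hx : (x == c) = true
    · rw [if_pos hx] at hl
      rcases List.mem_cons.mp hl with h | h
      · subst h; simp
      · exact ih l (by rw [List.splitOn]; exact h)
    · rw [if_neg hx] at hl
      cases h2 : List.splitOnP (· == c) t with
      | nil => rw [h2] at hl; simp [List.modifyHead] at hl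
      | cons hd tl =>
        rw [h2] at hl; simp only [List.modifyHead] at hl
        rcases List.mem_cons.mp hl with h | h
        · subst h; intro hmem
          rcases List.mem_cons.mp hmem with h | h
          · exact hx (by simp [h])
          · exact ih hd (by rw [List.splitOn, h2]; simp) h
        · exact ih l (by rw [List.splitOn, h2]; exact List.mem_cons_of_mem _ h)

theorem pv_splitOn_of_not_mem {c : Char} : ∀ {a : List Char}, c ∉ a → List.splitOn c a = [a] := by
  intro a
  induction a with
  | nil => intro _; simp [List.splitOn, List.splitOnP_nil]
  | cons x t ih =>
    intro h
    obtain ⟨h1, h2⟩ : ¬ c = x ∧ c ∉ t := by simpa [not_or] using h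
    rw [List.splitOn, List.splitOnP_cons,
      if_neg (by simp only [beq_iff_eq]; exact fun e => h1 e.symm)]
    rw [show List.splitOnP (· == c) t = List.splitOn c t from rfl, ih h2]
    simp [List.modifyHead]

theorem pv_splitOn_append_cons (c : Char) : ∀ (a b : List Char), c ∉ a →
    List.splitOn c (a ++ c :: b) = a :: List.splitOn c b := by
  intro a
  induction a with
  | nil =>
    intro b _
    simp only [List.nil_append, List.splitOn, List.splitOnP_cons, beq_self_eq_true, if_true]
  | cons x t ih =>
    intro b h
    obtain ⟨h1, h2⟩ : ¬ c = x ∧ c ∉ t := by simpa [not_or] using h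
    rw [List.cons_append, List.splitOn, List.splitOnP_cons,
      if_neg (by simp only [beq_iff_eq]; exact fun e => h1 e.symm)]
    rw [show List.splitOnP (· == c) (t ++ c :: b) = List.splitOn c (t ++ c :: b) from rfl, ih b h2]
    simp [List.modifyHead]

theorem pv_chunks (c : Char) : ∀ (L : List (List Char)) (a : List Char), c ∉ a → (∀ l ∈ L, c ∉ l) →
    List.splitOn c (a ++ (L.map (fun l => c :: l)).flatten) = a :: L := by
  intro L
  induction L with
  | nil => intro a ha _; simpa using pv_splitOn_of_not_mem ha
  | cons l rest ih =>
    intro a ha hL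
    rw [List.map_cons, List.flatten_cons]
    rw [show a ++ ((c :: l) ++ (rest.map (fun l => c :: l)).flatten)
          = a ++ c :: (l ++ (rest.map (fun l => c :: l)).flatten) from by simp]
    rw [pv_splitOn_append_cons c a _ ha]
    rw [ih l (hL l (by simp)) (fun x hx => hL x (by simp [hx]))]

theorem pv_foldl_str (p : String) : ∀ (ls : List String) (r : String),
    (List.foldl (fun r l => r ++ p ++ l) r ls).toList
      = r.toList ++ (ls.map (fun l => p.toList ++ l.toList)).flatten := by
  intro ls
  induction ls with
  | nil => intro r; simp
  | cons x t ih =>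
    intro r
    rw [List.foldl_cons, ih]
    simp [String.toList_append, List.append_assoc]

theorem pv_foldl_snoc {α β : Type} (g : α → β) : ∀ (l : List α) (acc : List β),
    List.foldl (fun acc i => acc ++ [g i]) acc l = acc ++ l.map g := by
  intro l
  induction l with
  | nil => intro acc; simp
  | cons x t ih => intro acc; rw [List.foldl_cons, ih]; simp

theorem pv_map_flatMap {α β γ : Type} (f : β → γ) (g : α → List β) : ∀ (l : List α),
    (l.flatMap g).map f = l.flatMap (fun x => (g x).map f) := by
  intro l
  induction l with
  | nil => simp
  | cons x t ih => simp [List.flatMap_cons, ih]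

theorem pv_flatMap_map {α β γ : Type} (f : β → List γ) (g : α → β) : ∀ (l : List α),
    (l.map g).flatMap f = l.flatMap (fun x => f (g x)) := by
  intro l
  induction l with
  | nil => simp
  | cons x t ih => simp [List.flatMap_cons, ih]

theorem pv_inter_cons (c : Char) : ∀ (rest : List (List Char)) (a : List Char),
    [c].intercalate (a :: rest) = a ++ (rest.map (fun l => c :: l)).flatten := by
  intro rest
  induction rest with
  | nil => intro a; simp [List.intercalate]
  | cons b t ih =>
    intro a
    have hb := ih b
    simp only [List.intercalate] at hb ⊢
    rw [List.intersperse_cons₂]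
    simp only [List.flatten_cons]
    rw [hb]
    simp

-- double loop of generate_tag: each content string is split on '\n' and each line appended as '\n  '+line
theorem pv_double_fold : ∀ (content : List String) (r : String),
    (content.foldl (fun r data => (pySplitNL data).foldl (fun r line => r ++ "\n  " ++ line) r) r).toList
      = r.toList
        ++ ((content.flatMap (fun d => List.splitOn '\n' d.toList)).map
              (fun l => '\n' :: ("  ".toList ++ l))).flatten := by
  intro content
  induction content with
  | nil => intro r; simp
  | cons d rest ih =>
    intro r
    rw [List.foldl_cons, ih, pv_foldl_str]
    have hnl : ("\n  " : String).toList = '\n' :: "  ".toList := by decide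
    simp [pySplitNL, pv_splitOn_single, List.map_map, Function.comp_def, String.toList_ofList,
      List.flatMap_cons, List.map_append, List.flatten_append, List.append_assoc, hnl]

theorem pv_main (interests : List String) :
    create_interests_tag interests = create_interests_tag_alt interests := by
  rw [← String.toList_inj]
  -- A side: normalize the li-building fold, then compute the ul string and its re-split
  have hli : ∀ i : String, (generate_one_word_tag "li" "" i).toList
      = "<li>".toList ++ (i.toList ++ "</li>".toList) := by
    intro i
    have h1 : ("<" : String).toList = ['<'] := by decide
    have h2 : ("li" : String).toList = ['l', 'i'] := by decide
    have h3 : (">" : String).toList = ['>'] := by decide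
    have h4 : ("</" : String).toList = ['<', '/'] := by decide
    have h5 : ("<li>" : String).toList = ['<', 'l', 'i', '>'] := by decide
    have h6 : ("</li>" : String).toList = ['<', '/', 'l', 'i', '>'] := by decide
    simp [generate_one_word_tag, String.toList_append, h2, h3, h4, h5, h6]
  have hul : (generate_tag "ul" "" (interests.map (fun i => generate_one_word_tag "li" "" i))).toList
      = "<ul>".toList
        ++ (((interests.flatMap
                (fun i => List.splitOn '\n' ("<li>".toList ++ (i.toList ++ "</li>".toList)))).map
              (fun l => "  ".toList ++ l)).map (fun l => '\n' :: l)).flatten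
        ++ '\n' :: "</ul>".toList := by
    simp only [generate_tag, if_neg (by simp : ¬ ("" : String) ≠ "")]
    rw [String.toList_append, String.toList_append, String.toList_append, pv_double_fold]
    rw [pv_flatMap_map]
    have h1 : ("<" : String).toList = ['<'] := by decide
    have h2 : ("ul" : String).toList = ['u', 'l'] := by decide
    have h3 : (">" : String).toList = ['>'] := by decide
    have h4 : ("\n</" : String).toList = ['\n', '<', '/'] := by decide
    have h5 : ("<ul>" : String).toList = ['<', 'u', 'l', '>'] := by decide
    have h6 : ("</ul>" : String).toList = ['<', '/', 'u', 'l', '>'] := by decide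
    simp [hli, h2, h3, h4, h5, h6, List.map_map, Function.comp_def, List.append_assoc]
  have hulsplit : List.splitOn '\n'
        ((generate_tag "ul" "" (interests.map (fun i => generate_one_word_tag "li" "" i))).toList)
      = "<ul>".toList
        :: ((interests.flatMap
              (fun i => List.splitOn '\n' ("<li>".toList ++ (i.toList ++ "</li>".toList)))).map
            (fun l => "  ".toList ++ l) ++ ["</ul>".toList]) := by
    rw [hul]
    have hc := pv_chunks '\n'
      ((interests.flatMap
          (fun i => List.splitOn '\n' ("<li>".toList ++ (i.toList ++ "</li>".toList)))).map
        (fun l => "  ".toList ++ l) ++ ["</ul>".toList])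
      "<ul>".toList (by decide)
      (by
        intro l hl
        rcases List.mem_append.mp hl with h | h
        · rcases List.mem_map.mp h with ⟨x, hx, rfl⟩
          rcases List.mem_flatMap.mp hx with ⟨i, _, hxi⟩
          have hni := pv_not_mem_splitOn '\n' _ x hxi
          intro hmem
          rcases List.mem_append.mp hmem with h' | h'
          · exact absurd h' (by decide)
          · exact hni h'
        · simp only [List.mem_singleton] at h; subst h; decide)
    rw [← hc]
    simp [List.map_append, List.flatten_append]
  have hhdr : List.splitOn '\n' ((generate_one_word_tag "h2" "" "Interests:").toList)
      = [(generate_one_word_tag "h2" "" "Interests:").toList] := by decide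
  have hA0 : create_interests_tag interests
      = generate_tag "div" "interests"
          [generate_one_word_tag "h2" "" "Interests:",
           generate_tag "ul" "" (interests.map (fun i => generate_one_word_tag "li" "" i))] := by
    simp only [create_interests_tag]
    rw [pv_foldl_snoc (fun interest => generate_one_word_tag "li" "" interest) interests [],
      List.nil_append]
  have houter : ∀ hdr u : String, (generate_tag "div" "interests" [hdr, u]).toList
      = ("<" ++ "div" ++ " class=\"" ++ "interests" ++ "\">").toList
        ++ ((List.splitOn '\n' hdr.toList ++ List.splitOn '\n' u.toList).map
              (fun l => '\n' :: ("  ".toList ++ l))).flatten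
        ++ ("\n</".toList ++ ("div".toList ++ ">".toList)) := by
    intro hdr u
    simp only [generate_tag, if_pos (by simp : ("interests" : String) ≠ "")]
    rw [String.toList_append, String.toList_append, String.toList_append, pv_double_fold]
    simp [List.flatMap_cons, List.append_assoc]
  rw [hA0, houter, hhdr, hulsplit]
  -- B side: flatten the nested appending loops into a flatMap, then open the join
  simp only [create_interests_tag_alt]
  simp only [pv_foldl_snoc]
  simp only [PySem.List.foldl_append_eq_flatMap]
  simp only [PySem.Str.join, PySem.Chars.join, String.toList_ofList]
  have hnll : ("\n" : String).toList = ['\n'] := by decide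
  rw [hnll]
  simp only [List.map_append, List.map_cons, List.map_nil, List.cons_append, List.nil_append,
    List.append_assoc]
  rw [pv_inter_cons]
  -- final normalization: both sides are literal char lists around the same flatMap over interests
  have e2 : (generate_one_word_tag "h2" "" "Interests:").toList
      = "<h2>Interests:</h2>".toList := by decide
  simp only [pySplitNL, pv_splitOn_single, pv_map_flatMap, List.map_map]
  simp [String.toList_append, String.toList_ofList, Function.comp_def,
    List.flatten_cons, List.flatten_append, List.map_append, List.append_assoc, e2,
    List.cons_append]
  simp [pv_map_flatMap, List.map_map, Function.comp_def]

-- ===== VERDICT (by name: the statement is the Claim_ definition above) =====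
theorem create_interests_tag_spec : Claim_equal_create_interests_tag := by
  intro interests _
  unfold Spec_create_interests_tag
  exact pv_main interests
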